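-- pv_equiv track=rewrite | github.com/pmolfese/afni | src/python_scripts/afnipy/afni_util.py | mat_row_mincol_maxcol_ragged_square
-- ===== SOURCE A (Python) =====
-- def mat_row_mincol_maxcol_ragged_square(M):
--     """check 5 properties of a matrix (list of lists) and return 5 ints:
--       nrow
--       min ncol
--       max ncol
--       is_ragged
--       is_square
--
--     """
--
--     if not(M):  return 0,0,0,0,0
--
--     is_square = 0             # just default; can change below
--
--     nrow      = len(M)
--     all_clen  = [len(r) for r in M]
--     ncolmin    = min(all_clen)
--     ncolmax    = max(all_clen)
--
--     if ncolmin == ncolmax :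
--         is_ragged = 0
--         if ncolmin == nrow :
--             is_square = 1
--     else:
--         is_ragged = 1
--
--     return nrow, ncolmin, ncolmax, is_ragged, is_square
-- ===== SOURCE B (Python) =====
-- def mat_row_mincol_maxcol_ragged_square(M):
--     if not M:
--         return 0, 0, 0, 0, 0
--     lens = sorted(len(r) for r in M)
--     nrow = len(M)
--     mn = lens[0]
--     mx = lens[-1]
--     if mn == mx:
--         return nrow, mn, mx, 0, 1 if mn == nrow else 0
--     return nrow, mn, mx, 1, 0
-- ===== Notes on version B (the rewrite author's own statement) =====
-- stated objective: alternative
-- what changed: Sorts the list of row lengths once and reads the min and max off its two ends instead of separate min() and max() scans over an intermediate length list.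
import Mathlib
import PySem

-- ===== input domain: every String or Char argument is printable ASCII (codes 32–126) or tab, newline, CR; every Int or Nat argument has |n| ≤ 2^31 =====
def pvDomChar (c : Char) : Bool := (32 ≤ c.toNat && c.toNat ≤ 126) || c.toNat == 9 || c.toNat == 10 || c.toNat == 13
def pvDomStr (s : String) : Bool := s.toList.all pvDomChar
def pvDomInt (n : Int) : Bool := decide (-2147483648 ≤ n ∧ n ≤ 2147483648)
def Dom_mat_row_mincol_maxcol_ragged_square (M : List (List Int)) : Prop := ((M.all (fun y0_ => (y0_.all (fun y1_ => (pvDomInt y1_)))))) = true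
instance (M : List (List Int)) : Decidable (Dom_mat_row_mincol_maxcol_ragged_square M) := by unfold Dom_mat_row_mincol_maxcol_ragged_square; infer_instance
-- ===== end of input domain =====

-- B sorts the row-length list once and reads min/max off its ends, instead of A's separate min() and max() scans; same result, a different algorithm (no speed claim).


-- ===== PORT A =====
def mat_row_mincol_maxcol_ragged_square (M : List (List Int)) : Int × Int × Int × Int × Int :=
  if M = [] then (0, 0, 0, 0, 0)
  else
    let is_square : Int := 0
    let nrow : Int := M.length
    let all_clen : List Int := M.map (fun r => (r.length : Int))
    let ncolmin : Int := (PySem.List.min? all_clen (fun x => x)).getD 0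
    let ncolmax : Int := (PySem.List.max? all_clen (fun x => x)).getD 0
    if ncolmin = ncolmax then
      (nrow, ncolmin, ncolmax, 0, if ncolmin = nrow then 1 else is_square)
    else
      (nrow, ncolmin, ncolmax, 1, is_square)

-- ===== PORT B =====
def mat_row_mincol_maxcol_ragged_square_alt (M : List (List Int)) : Int × Int × Int × Int × Int :=
  match M with
  | [] => (0, 0, 0, 0, 0)
  | _ :: _ =>
    let lens : List Int := PySem.List.sorted (M.map (fun r => (r.length : Int))) (fun x => x) false
    let nrow : Int := M.length
    let mn : Int := (PySem.List.pyGet? lens 0).getD 0          -- lens[0]; never none: lens nonempty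
    let mx : Int := (PySem.List.pyGet? lens (-1)).getD 0       -- lens[-1]; never none
    if mn = mx then (nrow, mn, mx, 0, if mn = nrow then 1 else 0)
    else (nrow, mn, mx, 1, 0)

-- ===== PRECONDITION & SPEC =====
def Spec_mat_row_mincol_maxcol_ragged_square (M : List (List Int)) (out : Int × Int × Int × Int × Int) : Prop := out = mat_row_mincol_maxcol_ragged_square_alt M
instance (M : List (List Int)) (out : Int × Int × Int × Int × Int) : Decidable (Spec_mat_row_mincol_maxcol_ragged_square M out) := by unfold Spec_mat_row_mincol_maxcol_ragged_square; infer_instance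

-- ===== CLAIM (what is proved, stated in full; the proofs are below) =====
def Claim_equal_mat_row_mincol_maxcol_ragged_square : Prop := ∀ (M : List (List Int)), Dom_mat_row_mincol_maxcol_ragged_square M → Spec_mat_row_mincol_maxcol_ragged_square M (mat_row_mincol_maxcol_ragged_square M)

-- ===== LEMMAS AND PROOFS =====

theorem le_getLast_of_pairwise (s : List Int) (l : Int)
    (hp : s.Pairwise (fun a b => a ≤ b)) (hl : s.getLast? = some l) :
    ∀ y ∈ s, y ≤ l := by
  induction s with
  | nil => simp at hl
  | cons x t ih =>
    rcases List.pairwise_cons.mp hp with ⟨hx, hpt⟩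
    cases t with
    | nil => simp_all
    | cons z zs =>
      intro y hy
      rcases List.mem_cons.mp hy with rfl | hy2
      · exact hx l (List.mem_of_getLast? (by simpa using hl))
      · exact ih hpt (by simpa using hl) y hy2

theorem sorted_head_eq_min (xs : List Int) (h : xs ≠ []) :
    (PySem.List.pyGet? (PySem.List.sorted xs (fun x => x) false) 0).getD 0
      = (PySem.List.min? xs (fun x => x)).getD 0 := by
  obtain ⟨mv, hmv⟩ : ∃ mv, PySem.List.min? xs (fun x => x) = some mv := by
    cases hm : PySem.List.min? xs (fun x => x) with
    | none => exact absurd ((PySem.List.min?_eq_none_iff xs _).mp hm) h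
    | some m => exact ⟨m, rfl⟩
  have hsne : PySem.List.sorted xs (fun x => x) false ≠ [] := by
    simpa [PySem.List.sorted_eq_nil_iff] using h
  obtain ⟨m, t, hs⟩ := List.exists_cons_of_ne_nil hsne
  have hmem : m ∈ xs := by
    have : m ∈ PySem.List.sorted xs (fun x => x) false := by simp [hs]
    simpa [PySem.List.mem_sorted] using this
  have h1 : mv ≤ m := PySem.List.min?_isMin hmv m hmem
  have h2 : m ≤ mv := PySem.List.key_head_sorted_le xs (fun x => x) hs mv (PySem.List.min?_mem hmv)
  rw [hs, PySem.List.pyGet?_zero_cons, hmv]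
  simpa using le_antisymm h2 h1

theorem sorted_last_eq_max (xs : List Int) (h : xs ≠ []) :
    (PySem.List.pyGet? (PySem.List.sorted xs (fun x => x) false) (-1)).getD 0
      = (PySem.List.max? xs (fun x => x)).getD 0 := by
  obtain ⟨mv, hmv⟩ : ∃ mv, PySem.List.max? xs (fun x => x) = some mv := by
    cases hm : PySem.List.max? xs (fun x => x) with
    | none => exact absurd ((PySem.List.max?_eq_none_iff xs _).mp hm) h
    | some m => exact ⟨m, rfl⟩
  have hsne : PySem.List.sorted xs (fun x => x) false ≠ [] := by
    simpa [PySem.List.sorted_eq_nil_iff] using h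
  obtain ⟨l, hl⟩ : ∃ l, (PySem.List.sorted xs (fun x => x) false).getLast? = some l := by
    cases hg : (PySem.List.sorted xs (fun x => x) false).getLast? with
    | none => exact absurd (List.getLast?_eq_none_iff.mp hg) hsne
    | some l => exact ⟨l, rfl⟩
  have hlmem : l ∈ xs := by
    have := List.mem_of_getLast? hl
    simpa [PySem.List.mem_sorted] using this
  have h1 : l ≤ mv := PySem.List.max?_isMax hmv l hlmem
  have hp : (PySem.List.sorted xs (fun x => x) false).Pairwise (fun a b => a ≤ b) := by
    simpa using PySem.List.sorted_pairwise xs (fun x => x)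
  have hmvS : mv ∈ PySem.List.sorted xs (fun x => x) false := by
    simp [PySem.List.mem_sorted]; exact PySem.List.max?_mem hmv
  have h2 : mv ≤ l := le_getLast_of_pairwise _ l hp hl mv hmvS
  rw [PySem.List.pyGet?_neg_one, hl, hmv]
  simpa using le_antisymm h1 h2

-- ===== VERDICT (by name: the statement is the Claim_ definition above) =====
theorem mat_row_mincol_maxcol_ragged_square_spec : Claim_equal_mat_row_mincol_maxcol_ragged_square := by
  intro M _
  unfold Spec_mat_row_mincol_maxcol_ragged_square
  cases M with
  | nil => rfl
  | cons r rs =>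
    have hne : (r :: rs).map (fun r => (r.length : Int)) ≠ [] := by simp
    simp only [mat_row_mincol_maxcol_ragged_square, mat_row_mincol_maxcol_ragged_square_alt,
      reduceCtorEq, if_false,
      sorted_head_eq_min _ hne, sorted_last_eq_max _ hne]
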